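-- pv_equiv track=rewrite | github.com/Elliot-Chan-120/PRISM | src/prism/a02_1_CompositeDNA_Toolkit.py | transstate_composition
-- ===== SOURCE A (Python) =====
-- def transstate_composition(seq, state_dict):
--     """
--     transitional state change composition tracker
--     :param seq:
--     :param state_dict: initialized at class instantiation
--     :return:
--     """
--     copy = state_dict.copy()
--
--     # build dictionary based off of all possible state changes and track differences between them
--     for idx in range(len(seq)-1):
--         current_state = seq[idx]
--         next_state = seq[idx+1]
--         if next_state != current_state:
--             copy[f"{current_state}_to_{next_state}"] += 1
--     return copy
-- ===== SOURCE B (Python) =====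
-- def transstate_composition(seq, state_dict):
--     copy = state_dict.copy()
--     # run-length compress the sequence to one representative per run
--     comp = []
--     for state in seq:
--         if not comp or comp[-1] != state:
--             comp.append(state)
--     # each boundary between adjacent runs is exactly one transition
--     for a, b in zip(comp, comp[1:]):
--         copy[f"{a}_to_{b}"] += 1
--     return copy
-- ===== Notes on version B (the rewrite author's own statement) =====
-- stated objective: alternative
-- what changed: Instead of scanning index pairs and testing each adjacent pair for inequality, B first run-length-compresses the sequence and then increments one transition counter per boundary of the compressed list, with no inequality test in the counting loop.
import Mathlib
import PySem

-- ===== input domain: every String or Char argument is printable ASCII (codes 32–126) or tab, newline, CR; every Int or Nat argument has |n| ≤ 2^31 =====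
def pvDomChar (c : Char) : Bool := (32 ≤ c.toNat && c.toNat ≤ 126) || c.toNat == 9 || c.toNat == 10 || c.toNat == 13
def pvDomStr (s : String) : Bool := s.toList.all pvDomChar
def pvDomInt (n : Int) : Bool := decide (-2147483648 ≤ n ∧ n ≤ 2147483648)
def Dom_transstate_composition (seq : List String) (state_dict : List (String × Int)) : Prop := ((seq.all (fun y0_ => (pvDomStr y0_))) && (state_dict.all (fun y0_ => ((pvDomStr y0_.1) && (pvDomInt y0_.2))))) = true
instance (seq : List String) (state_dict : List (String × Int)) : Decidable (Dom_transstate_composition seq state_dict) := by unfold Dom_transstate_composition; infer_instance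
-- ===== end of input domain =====

-- B replaces A's index loop with a guard inside by run-length compression followed by a
-- guard-free count over the run boundaries (objective: alternative decomposition, same cost).

-- ===== PORT A =====
def transstate_composition (seq : List String) (state_dict : List (String × Int)) : List (String × Int) :=
  let copy := PySem.Dict.ofList state_dict
  let copy := (PySem.List.pyRange 0 ((seq.length : Int) - 1) 1).foldl
    (fun c idx =>
      let current_state := PySem.List.pyGetD seq idx ""
      let next_state := PySem.List.pyGetD seq (idx + 1) ""
      if next_state ≠ current_state then
        -- copy[f"{cur}_to_{nxt}"] += 1 ; Pre_ guarantees the key is present, so modify = Python's += 1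
        c.modify (current_state ++ "_to_" ++ next_state) 0 (· + 1)
      else c) copy
  copy.items

-- ===== PORT B =====
def transstate_composition_alt (seq : List String) (state_dict : List (String × Int)) : List (String × Int) :=
  let copy := PySem.Dict.ofList state_dict
  let comp := seq.foldl
    (fun comp state =>
      if comp = [] ∨ comp.getLast? ≠ some state then comp ++ [state] else comp) []
  let copy := (comp.zip (PySem.List.slice comp (some 1) none)).foldl
    (fun c p => c.modify (p.1 ++ "_to_" ++ p.2) 0 (· + 1)) copy
  copy.items

-- ===== PRECONDITION & SPEC =====
-- Pre_ excludes exactly the inputs on which Python A raises KeyError: some adjacent unequal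
-- pair of states whose transition key is absent from state_dict.
def Pre_transstate_composition (seq : List String) (state_dict : List (String × Int)) : Prop :=
  ∀ p ∈ seq.zip seq.tail, p.2 ≠ p.1 → (p.1 ++ "_to_" ++ p.2) ∈ state_dict.map Prod.fst
instance (seq : List String) (state_dict : List (String × Int)) : Decidable (Pre_transstate_composition seq state_dict) := by unfold Pre_transstate_composition; infer_instance
def pvWitness_transstate_composition : List String × (List (String × Int)) :=
  (["a", "a", "b", "a"], [("a_to_b", 0), ("b_to_a", 0), ("a_to_a", 7)])

def Spec_transstate_composition (seq : List String) (state_dict : List (String × Int)) (out : List (String × Int)) : Prop := out = transstate_composition_alt seq state_dict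
instance (seq : List String) (state_dict : List (String × Int)) (out : List (String × Int)) : Decidable (Spec_transstate_composition seq state_dict out) := by unfold Spec_transstate_composition; infer_instance

-- ===== CLAIM (what is proved, stated in full; the proofs are below) =====
def Claim_equal_transstate_composition : Prop := ∀ (seq : List String) (state_dict : List (String × Int)), Dom_transstate_composition seq state_dict → Pre_transstate_composition seq state_dict → Spec_transstate_composition seq state_dict (transstate_composition seq state_dict)

-- ===== LEMMAS AND PROOFS =====

-- the counting step both loops perform at a transition boundary (a, b)
def pvStep (c : PySem.Dict String Int) (p : String × String) : PySem.Dict String Int :=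
  c.modify (p.1 ++ "_to_" ++ p.2) 0 (· + 1)

-- A's index loop reads exactly the adjacent pairs of seq
lemma pairs_of_range (xs : List String) :
    (PySem.List.pyRange 0 ((xs.length : Int) - 1) 1).map
      (fun i => (PySem.List.pyGetD xs i "", PySem.List.pyGetD xs (i + 1) "")) = xs.zip xs.tail := by
  apply List.ext_getElem
  · simp [PySem.List.length_pyRange_one]
  · intro k h1 h2
    simp only [List.getElem_map, PySem.List.getElem_pyRange_one, zero_add]
    rw [List.getElem_zip]
    have hk : k < xs.length := by simp [PySem.List.length_pyRange_one] at h1; omega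
    have hk1 : k + 1 < xs.length := by simp [PySem.List.length_pyRange_one] at h1; omega
    rw [List.getElem_tail]
    have e1 : PySem.List.pyGetD xs (k : Int) "" = xs[k] := by
      rw [PySem.List.pyGetD_natCast]; simp [List.getD, hk]
    have e2 : PySem.List.pyGetD xs ((k : Int) + 1) "" = xs[k+1] := by
      have : ((k : Int) + 1) = ((k + 1 : Nat) : Int) := by push_cast; ring
      rw [this, PySem.List.pyGetD_natCast]; simp [List.getD, hk1]
    rw [e1, e2]

-- run-length compression, restated structurally (the result of B's first loop)
def pvCrun : Option String → List String → List String
  | _, [] => []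
  | last, x :: t => if some x = last then pvCrun last t else x :: pvCrun (some x) t

lemma compress_foldl (xs : List String) : ∀ acc : List String,
    xs.foldl (fun comp state =>
      if comp = [] ∨ comp.getLast? ≠ some state then comp ++ [state] else comp) acc
      = acc ++ pvCrun acc.getLast? xs := by
  induction xs with
  | nil => intro acc; simp [pvCrun]
  | cons x t ih =>
    intro acc
    simp only [List.foldl_cons]
    by_cases h : acc = [] ∨ acc.getLast? ≠ some x
    · rw [if_pos h, ih]
      have hne : some x ≠ acc.getLast? := by
        rcases h with h | h
        · simp [h]
        · exact fun e => h e.symm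
      simp [pvCrun, hne]
    · rw [if_neg h, ih]
      simp only [not_or, not_not] at h
      rw [h.2]
      simp [pvCrun]

-- boundaries of the compressed list = unequal adjacent pairs of the original
lemma pairs_crun (t : List String) : ∀ x : String,
    ((x :: pvCrun (some x) t).zip (pvCrun (some x) t))
      = ((x :: t).zip t).filter (fun p => decide (p.2 ≠ p.1)) := by
  induction t with
  | nil => intro x; simp [pvCrun]
  | cons y t' ih =>
    intro x
    by_cases hyx : y = x
    · subst hyx
      simp only [pvCrun, List.zip_cons_cons, List.filter_cons]
      simp [ih y]
    · have hne : some y ≠ some x := by simp [hyx]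
      simp only [pvCrun, if_neg hne, List.zip_cons_cons, List.filter_cons]
      simp [hyx, ih y]

theorem transstate_composition_spec : Claim_equal_transstate_composition := by
  intro seq sd _ _
  unfold Spec_transstate_composition transstate_composition transstate_composition_alt
  apply congrArg PySem.Dict.items
  -- A side: fold over the index range = fold of pvStep over the unequal adjacent pairs
  have hA : (PySem.List.pyRange 0 ((seq.length : Int) - 1) 1).foldl
      (fun c idx =>
        let current_state := PySem.List.pyGetD seq idx ""
        let next_state := PySem.List.pyGetD seq (idx + 1) ""
        if next_state ≠ current_state then
          c.modify (current_state ++ "_to_" ++ next_state) 0 (· + 1)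
        else c) (PySem.Dict.ofList sd)
      = ((seq.zip seq.tail).filter (fun p => decide (p.2 ≠ p.1))).foldl pvStep
          (PySem.Dict.ofList sd) := by
    have h1 := List.foldl_map
      (f := fun i => (PySem.List.pyGetD seq i "", PySem.List.pyGetD seq (i + 1) ""))
      (g := fun (c : PySem.Dict String Int) (p : String × String) =>
        if p.2 ≠ p.1 then pvStep c p else c)
      (l := PySem.List.pyRange 0 ((seq.length : Int) - 1) 1)
      (init := PySem.Dict.ofList sd)
    rw [pairs_of_range] at h1
    rw [show (fun (c : PySem.Dict String Int) (idx : Int) =>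
        let current_state := PySem.List.pyGetD seq idx ""
        let next_state := PySem.List.pyGetD seq (idx + 1) ""
        if next_state ≠ current_state then
          c.modify (current_state ++ "_to_" ++ next_state) 0 (· + 1)
        else c) = (fun c idx =>
          if PySem.List.pyGetD seq (idx + 1) "" ≠ PySem.List.pyGetD seq idx "" then
            pvStep c (PySem.List.pyGetD seq idx "", PySem.List.pyGetD seq (idx + 1) "")
          else c) from rfl]
    rw [← h1, List.foldl_filter]
    simp only [decide_eq_true_eq]
  rw [hA]
  -- B side
  rw [compress_foldl seq []]
  simp only [List.nil_append, List.getLast?_nil]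
  cases seq with
  | nil => simp [pvCrun]
  | cons x t =>
    have hcr : pvCrun none (x :: t) = x :: pvCrun (some x) t := by
      simp [pvCrun]
    rw [hcr, PySem.List.slice_from_one]
    show (((x :: t).zip ((x :: t).tail)).filter (fun p => decide (p.2 ≠ p.1))).foldl pvStep
        (PySem.Dict.ofList sd)
      = ((x :: pvCrun (some x) t).zip (pvCrun (some x) t)).foldl
          (fun c p => c.modify (p.1 ++ "_to_" ++ p.2) 0 (· + 1)) (PySem.Dict.ofList sd)
    rw [pairs_crun]
    rfl
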